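-- pv_equiv track=rewrite | github.com/geswanel/Algorithms | YaAlgoTrainings/Training5.0/BinSearch/F.py | createSuffix
-- ===== SOURCE A (Python) =====
-- def createSuffix(h, lines, vertLines):
--     suffix = []
--     for line in lines[::-1]:
--         miny = h + 1; maxy = 0
--         for linePoint in vertLines[line]:
--             if linePoint[1] < miny:
--                 miny = linePoint[1]
--             if linePoint[1] > maxy:
--                 maxy = linePoint[1]
--
--         if suffix:
--             pMiny, pMaxy = suffix[-1]
--             suffix.append((min(pMiny, miny), max(pMaxy, maxy)))
--         else:
--             suffix.append((miny, maxy))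
--
--     return suffix[::-1]
-- ===== SOURCE B (Python) =====
-- def createSuffix(h, lines, vertLines):
--     # Divide and conquer: suffix extremes of the whole list = suffix extremes of the
--     # left half, each folded with the total extreme of the right half (= R[0]),
--     # concatenated with the suffix extremes of the right half.
--     n = len(lines)
--     if n == 0:
--         return []
--     if n == 1:
--         ys = [p[1] for p in vertLines[lines[0]]]
--         return [(min(ys + [h + 1]), max(ys + [0]))]
--     mid = n // 2
--     L = createSuffix(h, lines[:mid], vertLines)
--     R = createSuffix(h, lines[mid:], vertLines)
--     f = R[0]
--     return [(min(a, f[0]), max(b, f[1])) for (a, b) in L] + R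
-- ===== Notes on version B (the rewrite author's own statement) =====
-- stated objective: alternative
-- what changed: A makes one reversed pass that interleaves dict lookup, an if-based min/max scan and a running suffix accumulator, then reverses the result; B is a divide-and-conquer recursion: split the line list in half, compute suffix extremes of each half recursively, then fold the right half's total extreme (its first entry) into every entry of the left half and concatenate.
import Mathlib
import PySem

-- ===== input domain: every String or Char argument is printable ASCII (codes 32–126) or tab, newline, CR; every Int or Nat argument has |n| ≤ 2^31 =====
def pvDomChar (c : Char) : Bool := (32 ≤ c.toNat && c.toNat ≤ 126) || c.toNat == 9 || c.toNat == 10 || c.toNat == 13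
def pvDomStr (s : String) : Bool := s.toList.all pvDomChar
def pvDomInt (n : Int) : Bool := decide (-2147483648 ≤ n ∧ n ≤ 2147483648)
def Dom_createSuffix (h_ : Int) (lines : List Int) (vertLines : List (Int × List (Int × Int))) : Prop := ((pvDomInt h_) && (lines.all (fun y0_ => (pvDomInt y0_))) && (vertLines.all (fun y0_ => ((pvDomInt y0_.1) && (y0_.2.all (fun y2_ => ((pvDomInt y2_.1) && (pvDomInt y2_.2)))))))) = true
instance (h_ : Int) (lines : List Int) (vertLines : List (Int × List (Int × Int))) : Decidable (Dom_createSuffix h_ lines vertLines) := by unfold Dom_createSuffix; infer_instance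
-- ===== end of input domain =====

-- B replaces A's single reversed accumulator loop by a divide-and-conquer recursion on
-- halves of the line list (alternative decomposition, same result).

-- ===== PORT A =====
-- one step of A's outer loop: inner min/max scan over the line's points, then append
def createSuffixStepA (h_ : Int) (vertLines : List (Int × List (Int × Int)))
    (suffix : List (Int × Int)) (line : Int) : List (Int × Int) :=
  let pts := (PySem.Dict.mk vertLines).getD line []   -- vertLines[line]; KeyError excluded by Pre_
  let mm := pts.foldl (fun (mm : Int × Int) p =>
      (if p.2 < mm.1 then p.2 else mm.1, if p.2 > mm.2 then p.2 else mm.2)) (h_ + 1, 0)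
  match PySem.List.pyGet? suffix (-1) with   -- suffix[-1]; none exactly when `if suffix:` is false
  | some pm => suffix ++ [(min pm.1 mm.1, max pm.2 mm.2)]
  | none => suffix ++ [(mm.1, mm.2)]

def createSuffix (h_ : Int) (lines : List Int) (vertLines : List (Int × List (Int × Int))) : List (Int × Int) :=
  let rev := (PySem.List.slice? lines none none (-1)).getD []   -- lines[::-1]
  let suffix := rev.foldl (createSuffixStepA h_ vertLines) []
  (PySem.List.slice? suffix none none (-1)).getD []             -- suffix[::-1]

-- ===== PORT B =====
-- per-line extremes: min([ys] + [h+1]), max([ys] + [0])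
def extremesB (h_ : Int) (pts : List (Int × Int)) : Int × Int :=
  ((PySem.List.min? (pts.map Prod.snd ++ [h_ + 1]) (fun y => y)).getD 0,
   (PySem.List.max? (pts.map Prod.snd ++ [0]) (fun y => y)).getD 0)

-- divide and conquer on the list of lines, as in Source B
def createSuffixDC (h_ : Int) (vertLines : List (Int × List (Int × Int))) :
    List Int → List (Int × Int)
  | [] => []
  | [l] => [extremesB h_ ((PySem.Dict.mk vertLines).getD l [])]
  | l1 :: l2 :: rest =>
    let mid : Nat := (l1 :: l2 :: rest).length / 2    -- n // 2, n ≥ 2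
    let L := createSuffixDC h_ vertLines ((l1 :: l2 :: rest).take mid)   -- lines[:mid]
    let R := createSuffixDC h_ vertLines ((l1 :: l2 :: rest).drop mid)   -- lines[mid:]
    let f := (PySem.List.pyGet? R 0).getD (0, 0)      -- R[0]; R is always nonempty
    L.map (fun ab => (min ab.1 f.1, max ab.2 f.2)) ++ R
termination_by ls => ls.length
decreasing_by
  · simp; omega
  · simp; omega

def createSuffix_alt (h_ : Int) (lines : List Int) (vertLines : List (Int × List (Int × Int))) : List (Int × Int) :=
  createSuffixDC h_ vertLines lines

-- ===== PRECONDITION & SPEC =====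
-- Pre_ excludes exactly the inputs where Python A raises KeyError: some line not a key of vertLines.
def Pre_createSuffix (h_ : Int) (lines : List Int) (vertLines : List (Int × List (Int × Int))) : Prop :=
  ∀ l ∈ lines, (PySem.Dict.mk vertLines).contains l = true
instance (h_ : Int) (lines : List Int) (vertLines : List (Int × List (Int × Int))) : Decidable (Pre_createSuffix h_ lines vertLines) := by unfold Pre_createSuffix; infer_instance

def pvWitness_createSuffix : Int × List Int × (List (Int × List (Int × Int))) :=
  (5, [1, 2], [(1, [(0, 3)]), (2, [])])

def Spec_createSuffix (h_ : Int) (lines : List Int) (vertLines : List (Int × List (Int × Int))) (out : List (Int × Int)) : Prop := out = createSuffix_alt h_ lines vertLines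
instance (h_ : Int) (lines : List Int) (vertLines : List (Int × List (Int × Int))) (out : List (Int × Int)) : Decidable (Spec_createSuffix h_ lines vertLines out) := by unfold Spec_createSuffix; infer_instance

-- ===== CLAIM (what is proved, stated in full; the proofs are below) =====
def Claim_equal_createSuffix : Prop := ∀ (h_ : Int) (lines : List Int) (vertLines : List (Int × List (Int × Int))), Dom_createSuffix h_ lines vertLines → Pre_createSuffix h_ lines vertLines → Spec_createSuffix h_ lines vertLines (createSuffix h_ lines vertLines)

-- ===== LEMMAS AND PROOFS =====

-- the common mathematical object: suffix min/max combination of a list of pairs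
def comb (a b : Int × Int) : Int × Int := (min a.1 b.1, max a.2 b.2)

def suffixComb : List (Int × Int) → List (Int × Int)
  | [] => []
  | e :: rest =>
    match suffixComb rest with
    | [] => [e]
    | f :: t => comb e f :: f :: t

theorem comb_comm (a b : Int × Int) : comb a b = comb b a := by
  unfold comb; rw [min_comm, max_comm]

theorem comb_assoc (a b c : Int × Int) : comb (comb a b) c = comb a (comb b c) := by
  unfold comb; rw [min_assoc, max_assoc]

theorem suffixComb_nil_iff (l : List (Int × Int)) : suffixComb l = [] ↔ l = [] := by
  cases l with
  | nil => simp [suffixComb]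
  | cons e rest =>
    simp only [suffixComb]
    cases suffixComb rest <;> simp

-- min/max fold arithmetic
theorem foldl_min_shift (t : List Int) (x y : Int) :
    t.foldl min (min x y) = min x (t.foldl min y) := by
  induction t generalizing y with
  | nil => simp
  | cons z t ih => simp only [List.foldl_cons, min_assoc]; exact ih (min y z)

theorem foldl_max_shift (t : List Int) (x y : Int) :
    t.foldl max (max x y) = max x (t.foldl max y) := by
  induction t generalizing y with
  | nil => simp
  | cons z t ih => simp only [List.foldl_cons, max_assoc]; exact ih (max y z)

-- the inner if-scans are min/max folds
theorem inner_fold_pair (pts : List (Int × Int)) (mn mx : Int) :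
    pts.foldl (fun (mm : Int × Int) p =>
      (if p.2 < mm.1 then p.2 else mm.1, if p.2 > mm.2 then p.2 else mm.2)) (mn, mx)
    = ((pts.map Prod.snd).foldl min mn, (pts.map Prod.snd).foldl max mx) := by
  induction pts generalizing mn mx with
  | nil => simp
  | cons p t ih =>
    simp only [List.foldl_cons, List.map_cons, ih]
    congr 1 <;> [skip; skip] <;> congr 1 <;> omega

theorem min_append_sentinel (ys : List Int) (a : Int) :
    (PySem.List.min? (ys ++ [a]) (fun y => y)).getD 0 = ys.foldl min a := by
  cases ys with
  | nil => simp [PySem.List.min?_id_cons]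
  | cons y t =>
    rw [List.cons_append, PySem.List.min?_id_cons]
    simp only [Option.getD_some, List.foldl_append, List.foldl_cons, List.foldl_nil]
    rw [foldl_min_shift t a y]; exact min_comm _ _

theorem max_append_sentinel (ys : List Int) (a : Int) :
    (PySem.List.max? (ys ++ [a]) (fun y => y)).getD 0 = ys.foldl max a := by
  cases ys with
  | nil => simp [PySem.List.max?_id_cons]
  | cons y t =>
    rw [List.cons_append, PySem.List.max?_id_cons]
    simp only [Option.getD_some, List.foldl_append, List.foldl_cons, List.foldl_nil]
    rw [foldl_max_shift t a y]; exact max_comm _ _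

-- A's step equals appending comb with extremesB
theorem stepA_eq (h_ : Int) (vertLines : List (Int × List (Int × Int)))
    (suffix : List (Int × Int)) (line : Int) :
    createSuffixStepA h_ vertLines suffix line =
      match suffix.getLast? with
      | some pm => suffix ++ [comb pm (extremesB h_ ((PySem.Dict.mk vertLines).getD line []))]
      | none => suffix ++ [extremesB h_ ((PySem.Dict.mk vertLines).getD line [])] := by
  simp only [createSuffixStepA, extremesB, comb, inner_fold_pair,
    PySem.List.pyGet?_neg_one, min_append_sentinel, max_append_sentinel]

-- A's outer loop builds (suffixComb ext).reverse
theorem A_loop (h_ : Int) (vertLines : List (Int × List (Int × Int))) (lines : List Int) :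
    lines.reverse.foldl (createSuffixStepA h_ vertLines) [] =
      (suffixComb (lines.map (fun l => extremesB h_ ((PySem.Dict.mk vertLines).getD l [])))).reverse := by
  induction lines with
  | nil => simp [suffixComb]
  | cons x xs ih =>
    rw [List.reverse_cons, List.foldl_append, ih, List.foldl_cons, List.foldl_nil, stepA_eq,
      List.getLast?_reverse]
    simp only [List.map_cons, suffixComb]
    cases hS : suffixComb (xs.map (fun l => extremesB h_ ((PySem.Dict.mk vertLines).getD l []))) with
    | nil => simp
    | cons f0 t => simp [comb_comm]

-- the divide-and-conquer combination law for suffixComb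
theorem suffixComb_append (xs ys : List (Int × Int)) (f : Int × Int) (t : List (Int × Int))
    (hy : suffixComb ys = f :: t) :
    suffixComb (xs ++ ys) = (suffixComb xs).map (fun a => comb a f) ++ (f :: t) := by
  induction xs with
  | nil => simp [suffixComb, hy]
  | cons x xs ih =>
    rw [List.cons_append]
    simp only [suffixComb, ih]
    cases hx : suffixComb xs with
    | nil => simp
    | cons a t0 => simp [comb_assoc]

-- B computes suffixComb of the per-line extremes
theorem DC_eq (h_ : Int) (vertLines : List (Int × List (Int × Int))) :
    ∀ (n : Nat) (ls : List Int), ls.length ≤ n →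
    createSuffixDC h_ vertLines ls =
      suffixComb (ls.map (fun l => extremesB h_ ((PySem.Dict.mk vertLines).getD l []))) := by
  intro n
  induction n with
  | zero =>
    intro ls hls
    have : ls = [] := by cases ls <;> simp_all
    subst this; simp [createSuffixDC, suffixComb]
  | succ n ih =>
    intro ls hls
    match ls with
    | [] => simp [createSuffixDC, suffixComb]
    | [l] => simp [createSuffixDC, suffixComb]
    | l1 :: l2 :: rest =>
      rw [createSuffixDC]
      have hlen : (l1 :: l2 :: rest).length = rest.length + 2 := by simp
      set ls := l1 :: l2 :: rest with hlsdef
      set mid : Nat := ls.length / 2 with hmid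
      have hmid1 : 1 ≤ mid := by rw [hmid, hlen]; omega
      have hmidlt : mid < ls.length := by rw [hmid, hlen]; omega
      have hL : (ls.take mid).length ≤ n := by
        simp only [List.length_take]; omega
      have hR : (ls.drop mid).length ≤ n := by
        simp only [List.length_drop]; omega
      rw [ih _ hL, ih _ hR]
      have hdropne : ls.drop mid ≠ [] := by
        intro hh; rw [List.drop_eq_nil_iff] at hh; omega
      obtain ⟨f, t, hft⟩ : ∃ f t,
          suffixComb ((ls.drop mid).map (fun l => extremesB h_ ((PySem.Dict.mk vertLines).getD l []))) = f :: t := by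
        cases hS : suffixComb ((ls.drop mid).map (fun l => extremesB h_ ((PySem.Dict.mk vertLines).getD l []))) with
        | nil =>
          rw [suffixComb_nil_iff, List.map_eq_nil_iff] at hS
          exact absurd hS hdropne
        | cons f t => exact ⟨f, t, rfl⟩
      rw [hft]
      simp only [PySem.List.pyGet?_zero, List.getElem?_cons_zero, Option.getD_some]
      have hsplit : ls.map (fun l => extremesB h_ ((PySem.Dict.mk vertLines).getD l []))
          = (ls.take mid).map (fun l => extremesB h_ ((PySem.Dict.mk vertLines).getD l []))
            ++ (ls.drop mid).map (fun l => extremesB h_ ((PySem.Dict.mk vertLines).getD l [])) := by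
        rw [← List.map_append, List.take_append_drop]
      rw [hsplit, suffixComb_append _ _ f t hft]
      rfl

-- ===== VERDICT (by name: the statement is the Claim_ definition above) =====
theorem createSuffix_spec : Claim_equal_createSuffix := by
  intro h_ lines vertLines _ _
  unfold Spec_createSuffix createSuffix createSuffix_alt
  rw [PySem.List.slice?_none_none_neg_one]
  simp only [Option.getD_some]
  rw [A_loop, PySem.List.slice?_none_none_neg_one]
  simp only [Option.getD_some, List.reverse_reverse]
  rw [DC_eq h_ vertLines lines.length lines le_rfl]
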